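-- pv_equiv track=rewrite | github.com/RealYoungk/biotect-valuation | backend/app/valuation/indicators/tech_trend.py | _assess_pipeline_maturity
-- ===== SOURCE A (Python) =====
-- from typing import List, Dict, Any, Optional
--
-- def _assess_pipeline_maturity(pipeline_stages: Dict[str, str]) -> str:
--     """파이프라인 성숙도 평가"""
--     stages = list(pipeline_stages.values())
--
--     if any('phase3' in stage.lower() or 'submitted' in stage.lower() for stage in stages):
--         return "Late-stage"
--     elif any('phase2' in stage.lower() for stage in stages):
--         return "Mid-stage"
--     elif any('phase1' in stage.lower() for stage in stages):
--         return "Early-stage"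
--     else:
--         return "Preclinical"
-- ===== SOURCE B (Python) =====
-- def _assess_pipeline_maturity(pipeline_stages):
--     """Single pass: reduce each stage to a numeric rank, take the max, map to a label."""
--     def rank(stage):
--         s = stage.lower()
--         if 'phase3' in s or 'submitted' in s:
--             return 3
--         if 'phase2' in s:
--             return 2
--         if 'phase1' in s:
--             return 1
--         return 0
--     r = max((rank(s) for s in pipeline_stages.values()), default=0)
--     if r == 3:
--         return "Late-stage"
--     if r == 2:
--         return "Mid-stage"
--     if r == 1:
--         return "Early-stage"
--     return "Preclinical"
-- ===== Notes on version B (the rewrite author's own statement) =====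
-- stated objective: alternative
-- what changed: Replaced A's three ordered any() scans over the stage list by one pass that maps each stage to a numeric rank (3/2/1/0 by substring priority), reduces with max (default 0), and maps the max rank to its label.
import Mathlib
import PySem

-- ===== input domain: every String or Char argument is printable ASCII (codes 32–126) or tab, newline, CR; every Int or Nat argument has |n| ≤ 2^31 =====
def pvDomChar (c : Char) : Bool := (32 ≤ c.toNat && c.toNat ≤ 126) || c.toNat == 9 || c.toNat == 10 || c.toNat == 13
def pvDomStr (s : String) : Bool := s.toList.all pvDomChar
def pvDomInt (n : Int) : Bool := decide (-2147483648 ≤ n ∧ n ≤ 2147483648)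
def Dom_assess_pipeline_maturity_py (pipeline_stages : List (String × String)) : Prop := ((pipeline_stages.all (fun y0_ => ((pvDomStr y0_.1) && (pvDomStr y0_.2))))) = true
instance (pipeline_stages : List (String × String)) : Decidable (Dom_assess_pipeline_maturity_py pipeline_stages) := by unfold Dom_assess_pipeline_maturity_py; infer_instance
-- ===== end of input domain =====

-- B replaces A's three ordered any() scans by one max-of-rank reduction per stage (alternative decomposition, same cost).


-- ===== PORT A =====
def assess_pipeline_maturity_py (pipeline_stages : List (String × String)) : String :=
  let stages := (PySem.Dict.mk pipeline_stages).values
  if stages.any (fun stage => PySem.Str.isIn "phase3" (PySem.Str.lower stage) || PySem.Str.isIn "submitted" (PySem.Str.lower stage)) then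
    "Late-stage"
  else if stages.any (fun stage => PySem.Str.isIn "phase2" (PySem.Str.lower stage)) then
    "Mid-stage"
  else if stages.any (fun stage => PySem.Str.isIn "phase1" (PySem.Str.lower stage)) then
    "Early-stage"
  else
    "Preclinical"

-- ===== PORT B =====
def pvStageRank (stage : String) : Int :=
  let s := PySem.Str.lower stage
  if PySem.Str.isIn "phase3" s || PySem.Str.isIn "submitted" s then 3
  else if PySem.Str.isIn "phase2" s then 2
  else if PySem.Str.isIn "phase1" s then 1
  else 0

def assess_pipeline_maturity_py_alt (pipeline_stages : List (String × String)) : String :=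
  let r := ((PySem.Dict.mk pipeline_stages).values.map pvStageRank).foldl max 0
  if r = 3 then "Late-stage"
  else if r = 2 then "Mid-stage"
  else if r = 1 then "Early-stage"
  else "Preclinical"

-- ===== PRECONDITION & SPEC =====
def Spec_assess_pipeline_maturity_py (pipeline_stages : List (String × String)) (out : String) : Prop := out = assess_pipeline_maturity_py_alt pipeline_stages
instance (pipeline_stages : List (String × String)) (out : String) : Decidable (Spec_assess_pipeline_maturity_py pipeline_stages out) := by unfold Spec_assess_pipeline_maturity_py; infer_instance

-- ===== CLAIM (what is proved, stated in full; the proofs are below) =====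
def Claim_equal_assess_pipeline_maturity_py : Prop := ∀ (pipeline_stages : List (String × String)), Dom_assess_pipeline_maturity_py pipeline_stages → Spec_assess_pipeline_maturity_py pipeline_stages (assess_pipeline_maturity_py pipeline_stages)

-- ===== LEMMAS AND PROOFS =====

-- Pure arithmetic: one max step against the ordered if-chains.
theorem pvMaxStep (a : Int) (b3 b2 b1 a3 a2 a1 : Bool) :
    max (max a (if b3 then (3:Int) else if b2 then 2 else if b1 then 1 else 0))
        (if a3 then (3:Int) else if a2 then 2 else if a1 then 1 else 0) =
      max a (if b3 || a3 then (3:Int) else if b2 || a2 then 2 else if b1 || a1 then 1 else 0) := by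
  cases b3 <;> cases b2 <;> cases b1 <;> cases a3 <;> cases a2 <;> cases a1 <;> simp

-- The max of the ranks equals A's ordered-any case analysis.
theorem foldl_rank_eq (l : List String) (a : Int) (ha : 0 ≤ a) :
    (l.map pvStageRank).foldl max a =
      max a
        (if l.any (fun stage => PySem.Str.isIn "phase3" (PySem.Str.lower stage) || PySem.Str.isIn "submitted" (PySem.Str.lower stage)) then 3
         else if l.any (fun stage => PySem.Str.isIn "phase2" (PySem.Str.lower stage)) then 2
         else if l.any (fun stage => PySem.Str.isIn "phase1" (PySem.Str.lower stage)) then 1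
         else 0) := by
  induction l generalizing a with
  | nil => simp; omega
  | cons s t ih =>
    simp only [List.map_cons, List.foldl_cons, List.any_cons]
    rw [ih (max a (pvStageRank s)) (le_trans ha (le_max_left _ _))]
    dsimp only [pvStageRank]
    exact pvMaxStep a _ _ _ _ _ _

theorem assess_core (pipeline_stages : List (String × String)) :
    assess_pipeline_maturity_py pipeline_stages = assess_pipeline_maturity_py_alt pipeline_stages := by
  unfold assess_pipeline_maturity_py assess_pipeline_maturity_py_alt
  dsimp only
  rw [foldl_rank_eq _ 0 le_rfl]
  split_ifs <;> first | rfl | omega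

-- ===== VERDICT (by name: the statement is the Claim_ definition above) =====
theorem assess_pipeline_maturity_py_spec : Claim_equal_assess_pipeline_maturity_py := by
  intro ps _
  unfold Spec_assess_pipeline_maturity_py
  exact assess_core ps
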